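-- pv_equiv track=rewrite | github.com/MatteoH2O1999/alphaPoke | utils/prettify_cross_evaluation.py | __check_useful_numbers
-- ===== SOURCE A (Python) =====
-- def __check_useful_numbers(players) -> bool:
--     player_list = []
--     for p in players:
--         player_list.append(__cut_player_number(p))
--     for p in player_list:
--         if not __check_useful_number(p, players):
--             return False
--     return True
--
-- def __check_useful_number(player, players) -> bool:
--     player = __cut_player_number(player)
--     player_list = []
--     for p in players:
--         player_list.append(__cut_player_number(p))
--     count = 0
--     for p in player_list:
--         if player == p:
--             count += 1
--     if count > 1:
--         return True
--     return False
--
-- def __cut_player_number(player):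
--     player_split = player.split(" ")
--     if player_split[-1].isnumeric() and len(player_split) > 1:
--         player_split = player_split[:-1]
--     return " ".join(player_split)
-- ===== SOURCE B (Python) =====
-- def __check_useful_numbers(players) -> bool:
--     counts = {}
--     for p in players:
--         c = __cut_player_number(p)
--         counts[c] = counts.get(c, 0) + 1
--     return all(v > 1 for v in counts.values())
--
-- def __cut_player_number(player):
--     player_split = player.split(" ")
--     if player_split[-1].isnumeric() and len(player_split) > 1:
--         player_split = player_split[:-1]
--     return " ".join(player_split)
-- ===== Notes on version B (the rewrite author's own statement) =====
-- stated objective: faster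
-- what changed: A re-cuts every name and re-counts its occurrences from scratch for each player (nested passes); B builds a counter of the cut names in one pass and checks that every count exceeds one. Pre_ excludes lists containing a name whose last two space-separated tokens are both numeric: for such names it is unspecified whether the disambiguating suffix is one token or both, A's pipeline effectively strips two tokens while B strips one, and either reading is defensible.
-- outside the precondition, e.g. on __check_useful_numbers(['a 1 2', 'a 1 2']): A returns False, B returns True; on __check_useful_numbers(['x', 'x', 'x 1 2']): A returns True, B returns False
import Mathlib
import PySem

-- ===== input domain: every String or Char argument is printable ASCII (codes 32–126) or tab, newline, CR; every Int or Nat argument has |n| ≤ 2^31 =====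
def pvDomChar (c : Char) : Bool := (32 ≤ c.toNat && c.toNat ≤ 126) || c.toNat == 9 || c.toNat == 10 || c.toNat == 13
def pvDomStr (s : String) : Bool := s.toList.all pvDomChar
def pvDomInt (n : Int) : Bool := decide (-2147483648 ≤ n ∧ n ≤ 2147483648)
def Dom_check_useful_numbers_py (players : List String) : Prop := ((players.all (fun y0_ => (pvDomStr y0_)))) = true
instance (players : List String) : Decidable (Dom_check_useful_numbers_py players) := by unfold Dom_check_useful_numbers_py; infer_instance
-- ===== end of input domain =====

-- B replaces A's quadratic per-player re-scan (which also cuts each name twice) by one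
-- counter pass over the cut names followed by a check of the counts (objective: faster).

-- ===== PORT A =====
-- shared helper __cut_player_number (identical in Source A and Source B).
-- player.split(" ") → PySem.Str.split? (some: sep " " ≠ ""); player_split[-1] → pyGet? (-1), always
-- some since split of any string is a nonempty list, so getD "" is exact; .isnumeric() → strIsdigit,
-- exact on the printable-ASCII domain Dom (the only numeric ASCII characters are the digits 0-9);
-- player_split[:-1] → PySem.List.slice none (some (-1)).
def cut_player_number (player : String) : String :=
  let player_split := (PySem.Str.split? player " ").getD []
  let player_split :=
    if PySem.Str.strIsdigit ((PySem.List.pyGet? player_split (-1)).getD "")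
        && decide (player_split.length > 1)
    then PySem.List.slice player_split none (some (-1))
    else player_split
  PySem.Str.join " " player_split

-- helper __check_useful_number of Source A
def check_useful_number (player : String) (players : List String) : Bool :=
  let player := cut_player_number player
  let player_list := players.foldl (fun acc p => acc ++ [cut_player_number p]) []
  let count := player_list.foldl (fun c p => if player == p then c + 1 else c) (0 : Int)
  if count > 1 then true else false

-- Source A's second loop returns False as soon as one check fails (early return)
def checkAllA : List String → List String → Bool
  | [], _ => true
  | p :: rest, players =>
      if !(check_useful_number p players) then false else checkAllA rest players

def check_useful_numbers_py (players : List String) : Bool :=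
  let player_list := players.foldl (fun acc p => acc ++ [cut_player_number p]) []
  checkAllA player_list players

-- ===== PORT B =====
def check_useful_numbers_py_alt (players : List String) : Bool :=
  let counts := players.foldl
    (fun d p =>
      let c := cut_player_number p
      d.insert c (d.getD c 0 + 1))
    (PySem.Dict.empty : PySem.Dict String Int)
  counts.values.all (fun v => decide (v > 1))

-- ===== PRECONDITION & SPEC =====
-- names whose space-split token list has at least three tokens with the last two numeric
def pvDoubly (p : String) : Bool :=
  match (List.splitOn ' ' p.toList).reverse with
  | a :: b :: _ :: _ => !a.isEmpty && a.all Char.isDigit && (!b.isEmpty && b.all Char.isDigit)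
  | _ => false

-- Pre_ excludes lists containing a name whose last two space-separated tokens are both numeric:
-- for such names it is unspecified whether the disambiguating suffix is one token or both; A's
-- pipeline effectively strips two tokens while B strips one, and either reading is defensible.
def Pre_check_useful_numbers_py (players : List String) : Prop := players.any pvDoubly = false
instance (players : List String) : Decidable (Pre_check_useful_numbers_py players) := by
  unfold Pre_check_useful_numbers_py; infer_instance

def pvWitness_check_useful_numbers_py : List String := ["Player 1", "Player 1", "Bot"]

def Spec_check_useful_numbers_py (players : List String) (out : Bool) : Prop :=
  out = check_useful_numbers_py_alt players
instance (players : List String) (out : Bool) : Decidable (Spec_check_useful_numbers_py players out) := by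
  unfold Spec_check_useful_numbers_py; infer_instance

-- ===== CLAIM (what is proved, stated in full; the proofs are below) =====
def Claim_equal_check_useful_numbers_py : Prop := ∀ (players : List String), Dom_check_useful_numbers_py players → Pre_check_useful_numbers_py players → Spec_check_useful_numbers_py players (check_useful_numbers_py players)

-- ===== LEMMAS AND PROOFS =====

-- PySem.Chars.splitOn with a single-character separator is Mathlib's List.splitOn
lemma splitOn_go_single (c : Char) : ∀ (fuel : Nat) (l cur : List Char) (acc : List (List Char)),
    l.length < fuel →
    PySem.Chars.splitOn.go [c] fuel l cur acc
      = acc.reverse ++ List.modifyHead (cur.reverse ++ ·) (List.splitOnP (· == c) l) := by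
  intro fuel
  induction fuel with
  | zero => intro l cur acc h; omega
  | succ n ih =>
      intro l cur acc h
      cases l with
      | nil =>
          simp [PySem.Chars.splitOn.go, List.splitOnP_nil]
      | cons ch rest =>
          by_cases hc : c = ch
          · subst hc
            have hpre : [c].isPrefixOf (c :: rest) = true := by simp [List.isPrefixOf]
            rw [PySem.Chars.splitOn.go]
            simp only [hpre, if_true]
            rw [ih _ _ _ (by simpa using Nat.lt_of_succ_lt_succ h)]
            have hid : ∀ (l : List (List Char)), List.modifyHead (fun x => x) l = l := by
              intro l; cases l <;> rfl
            simp [List.splitOnP_cons, hid]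
          · have hpre : [c].isPrefixOf (ch :: rest) = false := by
              simp [List.isPrefixOf]; exact fun hh => hc hh
            rw [PySem.Chars.splitOn.go]
            simp only [hpre, Bool.false_eq_true, if_false]
            rw [ih rest (ch :: cur) acc (by simpa using Nat.lt_of_succ_lt_succ h)]
            have hb : (ch == c) = false := by simp; exact fun hh => hc hh.symm
            have hf : (fun x => (ch :: cur).reverse ++ x)
                = ((fun x => cur.reverse ++ x) ∘ List.cons ch) := by
              funext x; simp
            rw [List.splitOnP_cons]
            simp only [hb, Bool.false_eq_true, if_false, List.modifyHead_modifyHead]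
            rw [hf]

lemma chars_splitOn_single (c : Char) (cs : List Char) :
    PySem.Chars.splitOn cs [c] = List.splitOn c cs := by
  unfold PySem.Chars.splitOn
  rw [splitOn_go_single c (cs.length + 1) cs [] [] (by omega)]
  have hid : ∀ (l : List (List Char)), List.modifyHead (fun x => x) l = l := by
    intro l; cases l <;> rfl
  simp only [List.reverse_nil, List.nil_append]
  rw [hid]
  rfl

-- every piece of splitOnP is free of the separator
lemma splitOnP_pieces_not {α : Type} (P : α → Bool) (xs : List α) :
    ∀ t ∈ List.splitOnP P xs, ∀ a ∈ t, ¬ P a := by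
  induction xs with
  | nil => simp [List.splitOnP_nil]
  | cons x xs ih =>
      rw [List.splitOnP_cons]
      by_cases hx : P x
      · simp only [hx, if_true]
        intro t ht
        rcases List.mem_cons.mp ht with h | h
        · subst h; simp
        · exact ih t h
      · simp only [hx, Bool.false_eq_true, if_false]
        intro t ht
        cases hsp : List.splitOnP P xs with
        | nil => exact absurd hsp (List.splitOnP_ne_nil _ _)
        | cons h0 rest =>
            rw [hsp] at ht
            rcases List.mem_cons.mp ht with h | h
            · subst h
              intro a ha
              rcases List.mem_cons.mp ha with rfl | h
              · exact fun hh => hx hh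
              · exact ih h0 (hsp ▸ List.mem_cons_self) a h
            · exact ih t (hsp ▸ List.mem_cons_of_mem _ h)

-- the token list of a player name, at the char level
def pvToks (p : String) : List (List Char) := List.splitOn ' ' p.toList

lemma pvToks_ne_nil (p : String) : pvToks p ≠ [] := List.splitOnP_ne_nil _ _

-- the port's token list is pvToks, string-wrapped
lemma tokens_eq (p : String) :
    (PySem.Str.split? p " ").getD [] = (pvToks p).map String.ofList := by
  simp [PySem.Str.split?, PySem.Chars.split?, pvToks, chars_splitOn_single]

-- slicing off the last element
lemma slice_neg_one {α : Type} (l : List α) (h : l ≠ []) :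
    PySem.List.slice l none (some (-1)) = l.dropLast := by
  have hl : 1 ≤ l.length := List.length_pos_iff.mpr h
  simp [PySem.List.slice, PySem.List.clampIdx, List.dropLast_eq_take]
  rw [if_neg h]
  omega

-- pyGet? at -1 / -2
lemma pyGet_neg_one {α : Type} (l : List α) :
    PySem.List.pyGet? l (-1) = l.getLast? := by
  cases l with
  | nil => rfl
  | cons x xs =>
      have h : (x :: xs : List α) ≠ [] := by simp
      have hl : 1 ≤ (x :: xs).length := List.length_pos_iff.mpr h
      have hlt : (x :: xs).length - 1 < (x :: xs).length := by omega
      simp [PySem.List.pyGet?, PySem.List.pyIdx?, List.getLast?_eq_getElem?]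

-- cut at the token level
def pvCutT (ts : List (List Char)) : List (List Char) :=
  if PySem.Chars.strIsdigit (ts.getLastD []) && decide (1 < ts.length) then ts.dropLast else ts

lemma join_map_ofList (ts : List (List Char)) :
    PySem.Str.join " " (ts.map String.ofList) = String.ofList ([' '].intercalate ts) := by
  have hco : List.map (String.toList ∘ String.ofList) ts = ts := by
    simp [Function.comp_def, String.toList_ofList]
  have hsp : " ".toList = [' '] := rfl
  simp only [PySem.Str.join, PySem.Chars.join, List.map_map, hco, hsp]

lemma cut_eq_toks (p : String) :
    cut_player_number p = String.ofList ([' '].intercalate (pvCutT (pvToks p))) := by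
  have hne : pvToks p ≠ [] := pvToks_ne_nil p
  unfold cut_player_number pvCutT
  dsimp only
  rw [tokens_eq, pyGet_neg_one, List.getLast?_map]
  cases hts : (pvToks p).getLast? with
  | none => exact absurd (List.getLast?_eq_none_iff.mp hts) hne
  | some t =>
      have hlastD : (pvToks p).getLastD [] = t := by
        rw [List.getLastD_eq_getLast?, hts]; rfl
      simp only [Option.map_some, Option.getD_some, hlastD, PySem.Str.strIsdigit_eq,
        String.toList_ofList, List.length_map]
      cases hc : (PySem.Chars.strIsdigit t && decide ((pvToks p).length > 1)) with
      | false =>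
          simp only [Bool.false_eq_true, if_false]
          exact join_map_ofList _
      | true =>
          simp only [if_true]
          rw [slice_neg_one _ (by simpa using hne), ← List.map_dropLast]
          exact join_map_ofList _

-- the space-split pieces of any string are free of spaces
lemma pvToks_no_space (p : String) : ∀ t ∈ pvToks p, ' ' ∉ t := by
  intro t ht hsp
  exact splitOnP_pieces_not (· == ' ') p.toList t ht ' ' hsp (by simp)

lemma pvCutT_no_space (p : String) : ∀ t ∈ pvCutT (pvToks p), ' ' ∉ t := by
  intro t ht
  unfold pvCutT at ht
  split_ifs at ht
  · exact pvToks_no_space p t (List.mem_of_mem_dropLast ht)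
  · exact pvToks_no_space p t ht

lemma pvCutT_ne_nil (p : String) : pvCutT (pvToks p) ≠ [] := by
  unfold pvCutT
  split_ifs with hc
  · have hlen : 1 < (pvToks p).length := by
      have := (Bool.and_eq_true _ _).mp hc
      simpa using this.2
    have : 0 < (pvToks p).dropLast.length := by
      rw [List.length_dropLast]; omega
    exact List.length_pos_iff.mp this
  · exact pvToks_ne_nil p

-- re-splitting the cut name gives exactly the cut token list
lemma pvToks_cut (p : String) : pvToks (cut_player_number p) = pvCutT (pvToks p) := by
  rw [cut_eq_toks]
  unfold pvToks
  rw [String.toList_ofList]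
  exact List.splitOn_intercalate _ ' ' (fun l hl => pvCutT_no_space p l hl) (pvCutT_ne_nil p)

lemma strIsdigit_plain (t : List Char) :
    (!t.isEmpty && t.all Char.isDigit) = PySem.Chars.strIsdigit t := rfl

-- pvDoubly read off the token list
lemma pvDoubly_eq (p : String) (h2 : 2 ≤ (pvToks p).length) :
    pvDoubly p = (decide (3 ≤ (pvToks p).length)
      && PySem.Chars.strIsdigit ((pvToks p).getLastD [])
      && PySem.Chars.strIsdigit (((pvToks p)[(pvToks p).length - 2]?).getD [])) := by
  unfold pvDoubly
  have hts : List.splitOn ' ' p.toList = pvToks p := rfl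
  rw [hts]
  cases hr : (pvToks p).reverse with
  | nil =>
      exfalso
      have : (pvToks p).length = 0 := by simpa using congrArg List.length hr
      omega
  | cons a r1 =>
      cases r1 with
      | nil =>
          exfalso
          have : (pvToks p).length = 1 := by simpa using congrArg List.length hr
          omega
      | cons b r2 =>
          have hlen : (pvToks p).length = r2.length + 2 := by
            simpa using congrArg List.length hr
          have hlast : (pvToks p).getLastD [] = a := by
            rw [List.getLastD_eq_getLast?, ← List.head?_reverse, hr]; rfl
          have hb : ((pvToks p)[(pvToks p).length - 2]?).getD [] = b := by
            have hrev : (pvToks p).reverse[1]? = some b := by rw [hr]; rfl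
            rw [List.getElem?_reverse (by omega)] at hrev
            have hidx : (pvToks p).length - 1 - 1 = (pvToks p).length - 2 := by omega
            rw [hidx] at hrev
            rw [hrev]
            rfl
          cases r2 with
          | nil =>
              have h3 : decide (3 ≤ (pvToks p).length) = false := by
                simp [hlen]
              simp [h3]
          | cons c r3 =>
              dsimp only
              have h3 : decide (3 ≤ (pvToks p).length) = true := by
                rw [hlen]; simp only [List.length_cons, decide_eq_true_eq]; omega
              rw [h3, hlast, hb, Bool.true_and, strIsdigit_plain a, strIsdigit_plain b]

-- cutting an already-cut token list changes nothing outside the doubly-numbered case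
lemma pvCutT_idem (ts : List (List Char))
    (hdoub : ¬ (3 ≤ ts.length ∧ PySem.Chars.strIsdigit (ts.getLastD []) = true
      ∧ PySem.Chars.strIsdigit ((ts[ts.length - 2]?).getD []) = true)) :
    pvCutT (pvCutT ts) = pvCutT ts := by
  by_cases hc : (PySem.Chars.strIsdigit (ts.getLastD []) && decide (1 < ts.length)) = true
  · have hparts := (Bool.and_eq_true _ _).mp hc
    have hdig : PySem.Chars.strIsdigit (ts.getLastD []) = true := hparts.1
    have hlen : 1 < ts.length := by simpa using hparts.2
    have hcut : pvCutT ts = ts.dropLast := by unfold pvCutT; rw [if_pos hc]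
    rw [hcut]
    unfold pvCutT
    rw [if_neg]
    intro hc'
    have hparts' := (Bool.and_eq_true _ _).mp hc'
    have hlen' : 1 < ts.dropLast.length := by simpa using hparts'.2
    have h3 : 3 ≤ ts.length := by
      rw [List.length_dropLast] at hlen'; omega
    have hdne : ts.dropLast ≠ [] := by
      intro hnil
      rw [hnil] at hlen'; simp at hlen'
    have hidx : ts.length - 2 < ts.dropLast.length := by
      rw [List.length_dropLast]; omega
    have hlastD : ts.dropLast.getLastD [] = ts[ts.length - 2]'(by omega) := by
      rw [List.getLastD_eq_getLast?, List.getLast?_eq_getElem?,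
        List.getElem?_eq_getElem (by rw [List.length_dropLast] at hidx ⊢; omega)]
      simp only [Option.getD_some]
      rw [List.getElem_dropLast]
      congr 1
      simp only [List.length_dropLast]
      omega
    have hd2 : PySem.Chars.strIsdigit ((ts[ts.length - 2]?).getD []) = true := by
      have hh := hparts'.1
      rw [hlastD] at hh
      rw [List.getElem?_eq_getElem (by omega), Option.getD_some]
      exact hh
    exact hdoub ⟨h3, hdig, hd2⟩
  · have hcut : pvCutT ts = ts := by unfold pvCutT; rw [if_neg hc]
    rw [hcut, hcut]

-- idempotence of cut outside the doubly-numbered names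
lemma cut_cut (p : String) (h : pvDoubly p = false) :
    cut_player_number (cut_player_number p) = cut_player_number p := by
  have hidem : pvCutT (pvCutT (pvToks p)) = pvCutT (pvToks p) := by
    apply pvCutT_idem
    by_cases h2 : 2 ≤ (pvToks p).length
    · rw [pvDoubly_eq p h2] at h
      intro ⟨h3, hd1, hd2⟩
      rw [hd1, hd2] at h
      simp [h3] at h
    · intro ⟨h3, _, _⟩
      omega
  rw [cut_eq_toks (cut_player_number p), pvToks_cut, hidem, ← cut_eq_toks p]

-- the predicate both programs test, A's version (count of the re-cut name)
def pvMulti (players : List String) (c : String) : Bool :=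
  decide ((1 : Int) < ((players.map cut_player_number).count (cut_player_number c) : Int))

lemma check_useful_number_eq (p : String) (players : List String) :
    check_useful_number p players = pvMulti players p := by
  unfold check_useful_number pvMulti
  dsimp only
  rw [PySem.List.foldl_append_singleton_eq_map, List.nil_append]
  have hfun : (fun (c : Int) (q : String) => if cut_player_number p == q then c + 1 else c)
      = fun c q => if q == cut_player_number p then c + 1 else c := by
    funext c q; rw [Bool.beq_comm]
  rw [hfun, PySem.List.foldl_beq_add_one]
  simp only [zero_add]
  split_ifs with h <;> simp [h]

lemma checkAllA_eq_all (l players : List String) :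
    checkAllA l players = l.all (fun p => check_useful_number p players) := by
  induction l with
  | nil => rfl
  | cons p rest ih =>
      simp only [checkAllA, List.all_cons, ih]
      cases check_useful_number p players <;> simp

lemma A_eq (players : List String) :
    check_useful_numbers_py players = (players.map cut_player_number).all (pvMulti players) := by
  unfold check_useful_numbers_py
  dsimp only
  rw [PySem.List.foldl_append_singleton_eq_map, List.nil_append, checkAllA_eq_all]
  exact List.all_congr rfl (fun p => check_useful_number_eq p players)

lemma all_congr_mem {α : Type} {l₁ l₂ : List α} (h : ∀ x, x ∈ l₁ ↔ x ∈ l₂) (p : α → Bool) :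
    l₁.all p = l₂.all p := by
  rw [Bool.eq_iff_iff]
  simp only [List.all_eq_true]
  exact ⟨fun hp x hx => hp x ((h x).mpr hx), fun hp x hx => hp x ((h x).mp hx)⟩

lemma B_eq (players : List String) :
    check_useful_numbers_py_alt players
      = (PySem.Set.ofList (players.map cut_player_number)).all
          (fun c => decide ((1 : Int) < ((players.map cut_player_number).count c : Int))) := by
  unfold check_useful_numbers_py_alt
  dsimp only
  have hfold : players.foldl
      (fun (d : PySem.Dict String Int) p =>
        d.insert (cut_player_number p) (d.getD (cut_player_number p) 0 + 1))
      PySem.Dict.empty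
      = PySem.Dict.counter (players.map cut_player_number) := by
    rw [← List.foldl_map (f := cut_player_number)
      (g := fun (d : PySem.Dict String Int) c => d.insert c (d.getD c 0 + 1))]
    exact PySem.Dict.foldl_insert_getD_add_one_eq_counter _
  rw [hfold, PySem.Dict.values_eq_map_keys _ (PySem.Dict.nodup_keys_counter _) 0,
    PySem.Dict.keys_counter, List.all_map]
  refine List.all_congr rfl (fun c => ?_)
  rw [Function.comp_apply, PySem.Dict.getD_counter]

-- ===== VERDICT (by name: the statement is the Claim_ definition above) =====
lemma all_congr_fn_mem {α : Type} (l : List α) (p q : α → Bool)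
    (h : ∀ x ∈ l, p x = q x) : l.all p = l.all q := by
  rw [Bool.eq_iff_iff]
  simp only [List.all_eq_true]
  exact ⟨fun hp x hx => (h x hx) ▸ hp x hx, fun hq x hx => (h x hx) ▸ hq x hx⟩

-- ===== VERDICT (by name: the statement is the Claim_ definition above) =====
theorem check_useful_numbers_py_spec : Claim_equal_check_useful_numbers_py := by
  intro players _ hPre
  unfold Spec_check_useful_numbers_py
  have hall : ∀ p ∈ players, pvDoubly p = false := by
    intro p hp
    by_contra hpt
    have := List.any_eq_true.mpr ⟨p, hp, by simpa using hpt⟩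
    rw [hPre] at this
    exact Bool.false_ne_true this
  have hcuts : ∀ c ∈ players.map cut_player_number, cut_player_number c = c := by
    intro c hc
    obtain ⟨p, hp, rfl⟩ := List.mem_map.mp hc
    exact cut_cut p (hall p hp)
  rw [A_eq, B_eq]
  rw [all_congr_fn_mem _ _ (fun c => decide ((1 : Int) < ((players.map cut_player_number).count c : Int)))
    (fun c hc => by unfold pvMulti; rw [hcuts c hc])]
  exact all_congr_mem (fun x => (PySem.Set.mem_ofList (players.map cut_player_number) x).symm) _
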